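-- pv_equiv track=rewrite | github.com/stompsy/cpmdash | src/apps/charts/overdose/od_repeats_scatter.py | _build_display_label_map
-- ===== SOURCE A (Python) =====
-- def _alpha_suffix(index: int) -> str:
--     """Convert 1-based index to A, B, ..., Z, AA, AB, ..."""
--     if index <= 0:
--         return "A"
--     n = index
--     chars: list[str] = []
--     while n > 0:
--         n -= 1
--         chars.append(chr(ord("A") + (n % 26)))
--         n //= 26
--     return "".join(reversed(chars))
--
-- def _build_display_label_map(unique_labels: list[str]) -> dict[str, str]:
--     """Map internal unique labels ("ID 123: 44 M") to user-facing axis labels.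
--
--     Shows only age/sex, with an alphabetic disambiguator when collisions occur.
--     """
--     base_by_label = {label: label.split(": ", 1)[-1] for label in unique_labels}
--
--     base_counts: dict[str, int] = {}
--     for base in base_by_label.values():
--         base_counts[base] = base_counts.get(base, 0) + 1
--
--     display_map: dict[str, str] = {}
--     running_index: dict[str, int] = {}
--     for label in unique_labels:
--         base = base_by_label[label]
--         if base_counts.get(base, 0) <= 1:
--             display_map[label] = base
--             continue
--         idx = running_index.get(base, 0) + 1
--         running_index[base] = idx
--         display_map[label] = f"{base} ({_alpha_suffix(idx)})"
--     return display_map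
-- ===== SOURCE B (Python) =====
-- def _alpha_suffix(index: int) -> str:
--     """Convert 1-based index to A, B, ..., Z, AA, AB, ..."""
--     if index <= 0:
--         return "A"
--     n = index
--     chars: list[str] = []
--     while n > 0:
--         n -= 1
--         chars.append(chr(ord("A") + (n % 26)))
--         n //= 26
--     return "".join(reversed(chars))
--
-- def _build_display_label_map(unique_labels: list[str]) -> dict[str, str]:
--     """Map internal unique labels ("ID 123: 44 M") to user-facing axis labels.
--
--     One backward scan annotates each label with how many same-base labels
--     FOLLOW it; after the scan the same counter dict holds each base's total,
--     so a label's 1-based position is total - followers and a base is a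
--     singleton exactly when its total is 1.
--     """
--     after: dict[str, int] = {}
--     ann: list[tuple[str, str, int]] = []
--     for label in reversed(unique_labels):
--         base = label.split(": ", 1)[-1]
--         ann.append((label, base, after.get(base, 0)))
--         after[base] = after.get(base, 0) + 1
--     ann.reverse()
--     return {
--         label: base if after[base] == 1
--         else f"{base} ({_alpha_suffix(after[base] - k)})"
--         for label, base, k in ann
--     }
-- ===== Notes on version B (the rewrite author's own statement) =====
-- stated objective: alternative
-- what changed: Replaces A's forward count-pass plus a second forward pass threading a running per-base index through two dicts by ONE backward scan that annotates each label with the number of same-base labels following it; the same counter then holds each base's total, so the display is derived statelessly as total-followers (singleton iff total is 1).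
-- outside the precondition, e.g. on _build_display_label_map(['', '']): A returns {'': ''}, B returns {'': ' (B)'}; on _build_display_label_map(['a: x', 'a: x']): A returns {'a: x': 'x'}, B returns {'a: x': 'x (B)'}
import Mathlib
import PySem

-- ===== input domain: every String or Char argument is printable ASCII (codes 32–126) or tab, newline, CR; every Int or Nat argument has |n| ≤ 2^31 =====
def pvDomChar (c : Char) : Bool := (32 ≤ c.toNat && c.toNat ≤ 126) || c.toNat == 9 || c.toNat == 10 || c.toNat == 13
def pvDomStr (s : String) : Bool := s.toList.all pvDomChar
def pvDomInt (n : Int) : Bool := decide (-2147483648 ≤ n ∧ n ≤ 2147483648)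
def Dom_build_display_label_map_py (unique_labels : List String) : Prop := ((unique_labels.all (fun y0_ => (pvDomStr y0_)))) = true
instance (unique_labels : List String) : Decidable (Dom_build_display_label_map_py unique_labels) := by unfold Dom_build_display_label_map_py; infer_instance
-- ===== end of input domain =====

-- B replaces A's forward count-pass + stateful running-index pass by a single backward
-- scan counting followers per base; position = total − followers (objective: alternative).

-- ===== PORT A =====

-- shared helper: _alpha_suffix's while-loop (n -= 1; chars.append(chr(ord('A') + n % 26)); n //= 26)
def pvAlphaChars (n : Int) (chars : List Char) : List Char :=
  if h : 0 < n then
    have : (PySem.Int.floordiv (n - 1) 26).toNat < n.toNat := by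
      rw [PySem.Int.floordiv_eq_ediv_of_pos (by omega : (0:Int) < 26)]
      omega
    pvAlphaChars (PySem.Int.floordiv (n - 1) 26)
      (chars ++ [Char.ofNat (65 + (PySem.Int.mod (n - 1) 26)).toNat])
  else chars
termination_by n.toNat

-- shared helper: _alpha_suffix (both Pythons contain it verbatim)
def pvAlphaSuffix (index : Int) : String :=
  if index ≤ 0 then "A" else String.ofList (pvAlphaChars index []).reverse

-- shared helper: label.split(": ", 1)[-1] (the separator is nonempty, so splitMax? is `some`
-- and the result list is nonempty, so the [-1] indexing never raises; the defaults are unreachable)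
def pvBase (label : String) : String :=
  match PySem.Str.splitMax? label ": " 1 with
  | some parts => (PySem.List.pyGet? parts (-1)).getD ""
  | none => ""

def build_display_label_map_py (unique_labels : List String) : List (String × String) :=
  let base_by_label : PySem.Dict String String :=
    unique_labels.foldl (fun d label => d.insert label (pvBase label)) PySem.Dict.empty
  let base_counts : PySem.Dict String Int :=
    base_by_label.values.foldl (fun d base => d.insert base (d.getD base 0 + 1)) PySem.Dict.empty
  -- base_by_label[label]: the key is always present, so the "" default is unreachable
  (unique_labels.foldl
    (fun (st : PySem.Dict String String × PySem.Dict String Int) label =>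
      let base := base_by_label.getD label ""
      if base_counts.getD base 0 ≤ 1 then (st.1.insert label base, st.2)
      else
        let idx := st.2.getD base 0 + 1
        (st.1.insert label (base ++ " (" ++ pvAlphaSuffix idx ++ ")"), st.2.insert base idx))
    (PySem.Dict.empty, PySem.Dict.empty)).1.items

-- ===== PORT B =====

-- B's backward-scan step: append (label, base, followers-so-far) and bump the base's counter
def pvStepB (st : PySem.Dict String Int × List (String × String × Int)) (label : String) :
    PySem.Dict String Int × List (String × String × Int) :=
  let base := pvBase label
  (st.1.insert base (st.1.getD base 0 + 1),
   st.2 ++ [(label, base, st.1.getD base 0)])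

def build_display_label_map_py_alt (unique_labels : List String) : List (String × String) :=
  -- backward scan: ann records (label, base, followers-with-same-base); after ends as totals
  let st := unique_labels.reverse.foldl pvStepB (PySem.Dict.empty, [])
  let after := st.1
  let ann := st.2.reverse
  -- after[base]: the key is always present, so the 0 default is unreachable
  (ann.foldl
    (fun (d : PySem.Dict String String) t =>
      d.insert t.1
        (if after.getD t.2.1 0 == 1 then t.2.1
         else t.2.1 ++ " (" ++ pvAlphaSuffix (after.getD t.2.1 0 - t.2.2) ++ ")"))
    PySem.Dict.empty).items

-- ===== PRECONDITION & SPEC =====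
-- Pre_ excludes lists with duplicate labels (the parameter is documented as unique): there A counts
-- DISTINCT labels per base but indexes occurrences, so its suffixes (and silently overwritten entries)
-- are an accident of dict reinsertion; B counts every occurrence consistently.
def Pre_build_display_label_map_py (unique_labels : List String) : Prop := unique_labels.Nodup
instance (unique_labels : List String) : Decidable (Pre_build_display_label_map_py unique_labels) := by unfold Pre_build_display_label_map_py; infer_instance
def pvWitness_build_display_label_map_py : List String := ["ID 1: 44 M", "ID 2: 44 M", "ID 3: 45 F"]

def Spec_build_display_label_map_py (unique_labels : List String) (out : List (String × String)) : Prop := out = build_display_label_map_py_alt unique_labels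
instance (unique_labels : List String) (out : List (String × String)) : Decidable (Spec_build_display_label_map_py unique_labels out) := by unfold Spec_build_display_label_map_py; infer_instance

-- ===== CLAIM (what is proved, stated in full; the proofs are below) =====
def Claim_equal_build_display_label_map_py : Prop := ∀ (unique_labels : List String), Dom_build_display_label_map_py unique_labels → Pre_build_display_label_map_py unique_labels → Spec_build_display_label_map_py unique_labels (build_display_label_map_py unique_labels)

-- ===== LEMMAS AND PROOFS =====

-- the display value both loops end up computing for a label, as a function of the whole list
def pvDisp (all : List String) (l : String) : String :=
  let b := pvBase l
  let members := all.filter (fun x => pvBase x == b)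
  if members.length = 1 then b
  else b ++ " (" ++ pvAlphaSuffix (((PySem.List.index? members l).getD 0 : Int) + 1) ++ ")"

-- specification of B's annotation list: each label paired with its base and follower count
def pvAnnOf : List String → List (String × String × Int)
  | [] => []
  | a :: tl => (a, pvBase a, (((tl.map pvBase).count (pvBase a) : Nat) : Int)) :: pvAnnOf tl

-- the backward fold's two components: totals dict and reversed annotation list
theorem pv_backscan (xs : List String) :
    (∀ b, (xs.reverse.foldl pvStepB
        ((PySem.Dict.empty, []) : PySem.Dict String Int × List (String × String × Int))).1.getD b 0
        = (((xs.map pvBase).count b : Nat) : Int))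
    ∧ (xs.reverse.foldl pvStepB
        ((PySem.Dict.empty, []) : PySem.Dict String Int × List (String × String × Int))).2.reverse
        = pvAnnOf xs := by
  induction xs with
  | nil => exact ⟨fun _ => rfl, rfl⟩
  | cons a tl ih =>
    rw [List.reverse_cons, List.foldl_append]
    refine ⟨fun b => ?_, ?_⟩
    · simp only [List.foldl_cons, List.foldl_nil, pvStepB, PySem.Dict.getD_insert]
      by_cases hb : b = pvBase a
      · subst hb
        rw [if_pos rfl, ih.1 (pvBase a)]
        simp
      · rw [if_neg hb, ih.1 b]
        have : (pvBase a == b) = false := by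
          simp only [beq_eq_false_iff_ne]; exact fun h => hb h.symm
        simp [List.count_cons, this]
    · simp only [List.foldl_cons, List.foldl_nil, pvStepB, List.reverse_append,
        List.reverse_cons, List.reverse_nil, List.nil_append, List.cons_append]
      rw [ih.1 (pvBase a), ih.2]
      rfl

-- first components of the annotation list are the labels themselves
theorem pv_annOf_fst (xs : List String) : (pvAnnOf xs).map (·.1) = xs := by
  induction xs with
  | nil => rfl
  | cons a t ih => simp [pvAnnOf, ih]

-- first index of an element absent from the left part
theorem pv_idxOf_append_cons_self {α : Type} [BEq α] [LawfulBEq α]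
    (p : List α) (l : α) (h : l ∉ p) (rest : List α) :
    List.idxOf? l (p ++ l :: rest) = some p.length := by
  induction p with
  | nil => simp [List.idxOf?_cons]
  | cons a as ih =>
    simp only [List.mem_cons, not_or] at h
    simp [List.idxOf?_cons, Ne.symm h.1, ih h.2]

-- index of l inside its group = number of earlier same-base labels
theorem pv_index_filter (p rest : List String) (l : String)
    (hnd : (p ++ l :: rest).Nodup) :
    PySem.List.index? ((p ++ l :: rest).filter (fun x => pvBase x == pvBase l)) l
      = some (p.filter (fun x => pvBase x == pvBase l)).length := by
  have hlp : l ∉ p := fun hmem =>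
    (List.disjoint_of_nodup_append hnd) hmem List.mem_cons_self
  rw [List.filter_append, List.filter_cons_of_pos (by simp)]
  unfold PySem.List.index?
  exact pv_idxOf_append_cons_self _ l
    (fun hm => hlp (List.mem_of_mem_filter hm)) _

-- total occurrences of a base = length of its group
theorem pv_count_eq_length (all : List String) (b : String) :
    (all.map pvBase).count b = (all.filter (fun x => pvBase x == b)).length := by
  rw [List.count_eq_countP, List.countP_map]
  simp [Function.comp_def, List.countP_eq_length_filter]

-- B's per-annotation display equals pvDisp, suffix-by-suffix along the list
theorem pv_annOf_map (all : List String) (hnd : all.Nodup) :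
    ∀ (tl p : List String), all = p ++ tl →
    (pvAnnOf tl).map (fun t => (t.1,
        if (((all.map pvBase).count t.2.1 : Nat) : Int) == 1 then t.2.1
        else t.2.1 ++ " (" ++ pvAlphaSuffix ((((all.map pvBase).count t.2.1 : Nat) : Int) - t.2.2) ++ ")"))
      = tl.map (fun l => (l, pvDisp all l)) := by
  intro tl
  induction tl with
  | nil => intro p _; rfl
  | cons l tl' ih =>
    intro p hall
    have hnd' : (p ++ l :: tl').Nodup := hall ▸ hnd
    have hsplit : (all.map pvBase).count (pvBase l)
        = (p.filter (fun x => pvBase x == pvBase l)).length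
          + 1 + (tl'.map pvBase).count (pvBase l) := by
      rw [hall, List.map_append, List.count_append, List.map_cons, List.count_cons,
        pv_count_eq_length p (pvBase l)]
      simp [add_comm, add_assoc]
    have hidx : PySem.List.index? (all.filter (fun x => pvBase x == pvBase l)) l
        = some (p.filter (fun x => pvBase x == pvBase l)).length := by
      rw [hall]; exact pv_index_filter p tl' l hnd'
    have hlen : (all.filter (fun x => pvBase x == pvBase l)).length
        = (all.map pvBase).count (pvBase l) := (pv_count_eq_length all _).symm
    simp only [pvAnnOf, List.map_cons]
    rw [ih (p ++ [l]) (by simpa using hall)]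
    congr 1
    unfold pvDisp
    simp only
    by_cases h1 : (all.map pvBase).count (pvBase l) = 1
    · rw [if_pos (by rw [h1]; rfl), if_pos (by rw [hlen, h1])]
    · have hne : ¬ (((((all.map pvBase).count (pvBase l) : Nat) : Int) == 1) = true) := by
        simp only [beq_iff_eq]
        exact_mod_cast h1
      rw [if_neg hne, if_neg (by rw [hlen]; exact h1), hidx]
      simp only [Option.getD_some, Prod.mk.injEq, true_and]
      congr 1
      push_cast [hsplit]
      ring

-- B's output is the per-label map of pvDisp, in input order
theorem pv_alt_eq_map (all : List String) (hnd : all.Nodup) :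
    build_display_label_map_py_alt all = all.map (fun l => (l, pvDisp all l)) := by
  have hback := pv_backscan all
  unfold build_display_label_map_py_alt
  simp only
  set st := all.reverse.foldl pvStepB
      ((PySem.Dict.empty, []) : PySem.Dict String Int × List (String × String × Int))
    with hst
  rw [hback.2]
  rw [PySem.Dict.items_foldl_insert_fresh (pvAnnOf all) (fun t => t.1) _ PySem.Dict.empty
      (fun a _ => PySem.Dict.contains_empty a.1) (by rw [pv_annOf_fst]; exact hnd)]
  rw [show (PySem.Dict.empty : PySem.Dict String String).items = [] from rfl, List.nil_append]
  calc (pvAnnOf all).map _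
      = (pvAnnOf all).map (fun t => (t.1,
          if (((all.map pvBase).count t.2.1 : Nat) : Int) == 1 then t.2.1
          else t.2.1 ++ " (" ++ pvAlphaSuffix ((((all.map pvBase).count t.2.1 : Nat) : Int) - t.2.2) ++ ")")) :=
        List.map_congr_left (fun t _ => by rw [hback.1 t.2.1])
    _ = all.map (fun l => (l, pvDisp all l)) := pv_annOf_map all hnd all [] rfl

-- A's final loop, generalized: g is the base lookup, c the total per-base count
theorem pv_loopA (all : List String) (hnd : all.Nodup)
    (g : String → String) (hg : ∀ l ∈ all, g l = pvBase l)
    (c : String → Int) (hc : ∀ b, c b = ((all.map pvBase).count b : Int)) :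
    ∀ (rest p : List String), all = p ++ rest →
    ∀ (dm : PySem.Dict String String) (ri : PySem.Dict String Int),
    (∀ l ∈ rest, dm.contains l = false) →
    (∀ b, 1 < (all.map pvBase).count b →
      ri.getD b 0 = ((p.filter (fun x => pvBase x == b)).length : Int)) →
    (rest.foldl
      (fun (st : PySem.Dict String String × PySem.Dict String Int) label =>
        let base := g label
        if c base ≤ 1 then (st.1.insert label base, st.2)
        else
          let idx := st.2.getD base 0 + 1
          (st.1.insert label (base ++ " (" ++ pvAlphaSuffix idx ++ ")"), st.2.insert base idx))
      (dm, ri)).1.items = dm.items ++ rest.map (fun l => (l, pvDisp all l)) := by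
  intro rest
  induction rest with
  | nil => intro p _ dm ri _ _; simp
  | cons l rest' ih =>
    intro p hall dm ri hdm hri
    have hmem : l ∈ all := by rw [hall]; simp
    have hgl : g l = pvBase l := hg l hmem
    have hone : 1 ≤ (all.map pvBase).count (pvBase l) :=
      List.one_le_count_iff.mpr (List.mem_map_of_mem hmem)
    have hlen : (all.filter (fun x => pvBase x == pvBase l)).length
        = (all.map pvBase).count (pvBase l) := (pv_count_eq_length all _).symm
    have hnd' : (p ++ l :: rest').Nodup := hall ▸ hnd
    have hlrest : l ∉ rest' := by
      have h1 : (l :: rest').Nodup := (List.nodup_append.mp hnd').2.1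
      exact (List.nodup_cons.mp h1).1
    have hdmins : ∀ w, ∀ x ∈ rest', (dm.insert l w).contains x = false := by
      intro w x hx
      rw [PySem.Dict.contains_insert]
      have hxl : (x == l) = false := by
        simp only [beq_eq_false_iff_ne]
        exact fun he => hlrest (he ▸ hx)
      simp [hxl, hdm x (List.mem_cons_of_mem _ hx)]
    simp only [List.foldl_cons, hgl]
    by_cases hle : c (pvBase l) ≤ 1
    · -- the base is unique: bare base, running index untouched
      have hcnt1 : (all.map pvBase).count (pvBase l) = 1 := by
        have := hc (pvBase l); rw [this] at hle
        exact_mod_cast le_antisymm (by exact_mod_cast hle) hone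
      rw [if_pos hle]
      have hri' : ∀ b, 1 < (all.map pvBase).count b →
          ri.getD b 0 = (((p ++ [l]).filter (fun x => pvBase x == b)).length : Int) := by
        intro b hb
        have hbne : (pvBase l == b) = false := by
          simp only [beq_eq_false_iff_ne]
          intro he; rw [← he] at hb; omega
        rw [List.filter_append]
        simp [hbne, hri b hb]
      have := ih (p ++ [l]) (by simpa using hall) (dm.insert l (pvBase l)) ri
        (hdmins _) hri'
      rw [this, PySem.Dict.items_insert_of_not_contains dm _ (hdm l List.mem_cons_self)]
      have hdisp : pvDisp all l = pvBase l := by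
        unfold pvDisp
        rw [if_pos (by rw [hlen, hcnt1])]
      rw [List.map_cons, hdisp]
      simp
    · -- a collision: suffix from the running index / the follower count
      rw [if_neg hle]
      have hgt : 1 < (all.map pvBase).count (pvBase l) := by
        have := hc (pvBase l); rw [this] at hle
        omega
      have hriv : ri.getD (pvBase l) 0
          = ((p.filter (fun x => pvBase x == (pvBase l))).length : Int) := hri _ hgt
      have hidx : PySem.List.index? (all.filter (fun x => pvBase x == pvBase l)) l
          = some (p.filter (fun x => pvBase x == pvBase l)).length := by
        rw [hall]; exact pv_index_filter p rest' l hnd'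
      have hdisp : pvDisp all l
          = pvBase l ++ " (" ++ pvAlphaSuffix (ri.getD (pvBase l) 0 + 1) ++ ")" := by
        unfold pvDisp
        rw [if_neg (by rw [hlen]; omega), hidx, hriv]
        simp
      have hri' : ∀ b, 1 < (all.map pvBase).count b →
          (ri.insert (pvBase l) (ri.getD (pvBase l) 0 + 1)).getD b 0
            = (((p ++ [l]).filter (fun x => pvBase x == b)).length : Int) := by
        intro b hb
        rw [PySem.Dict.getD_insert, List.filter_append]
        by_cases hbe : b = pvBase l
        · subst hbe
          rw [if_pos rfl, hriv]
          simp
        · rw [if_neg hbe]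
          have hbne : (pvBase l == b) = false := by
            simp only [beq_eq_false_iff_ne]; exact fun he => hbe he.symm
          simp [hbne, hri b hb]
      have := ih (p ++ [l]) (by simpa using hall)
        (dm.insert l (pvBase l ++ " (" ++ pvAlphaSuffix (ri.getD (pvBase l) 0 + 1) ++ ")"))
        (ri.insert (pvBase l) (ri.getD (pvBase l) 0 + 1)) (hdmins _) hri'
      rw [this, PySem.Dict.items_insert_of_not_contains dm _ (hdm l List.mem_cons_self)]
      rw [List.map_cons, hdisp]
      simp

-- ===== VERDICT (by name: the statement is the Claim_ definition above) =====
theorem build_display_label_map_py_spec : Claim_equal_build_display_label_map_py := by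
  intro all _hdom hpre
  unfold Pre_build_display_label_map_py at hpre
  unfold Spec_build_display_label_map_py
  rw [pv_alt_eq_map all hpre]
  unfold build_display_label_map_py
  have hitems : (all.foldl (fun d label => d.insert label (pvBase label))
      (PySem.Dict.empty : PySem.Dict String String)).items
      = all.map (fun l => (l, pvBase l)) := by
    rw [PySem.Dict.items_foldl_insert_fresh all (fun l => l) pvBase PySem.Dict.empty
      (fun a _ => PySem.Dict.contains_empty a) (by simpa using hpre)]
    rw [show (PySem.Dict.empty : PySem.Dict String String).items = [] from rfl, List.nil_append]
  have hkeysnd : (all.foldl (fun d label => d.insert label (pvBase label))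
      (PySem.Dict.empty : PySem.Dict String String)).keys.Nodup := by
    exact PySem.Dict.nodup_keys_foldl_insert all (fun _ x => pvBase x) _
      (by rw [show (PySem.Dict.empty : PySem.Dict String String).keys = [] from rfl]; exact List.nodup_nil)
  have hg : ∀ l ∈ all, (all.foldl (fun d label => d.insert label (pvBase label))
      (PySem.Dict.empty : PySem.Dict String String)).getD l "" = pvBase l := by
    intro l hl
    exact PySem.Dict.getD_of_mem_items _
      (by rw [hitems]; exact List.mem_map_of_mem hl) hkeysnd ""
  have hvals : (all.foldl (fun d label => d.insert label (pvBase label))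
      (PySem.Dict.empty : PySem.Dict String String)).values = all.map pvBase := by
    show List.map _ _ = _
    rw [hitems, List.map_map]
    rfl
  have hc : ∀ b, ((all.foldl (fun d label => d.insert label (pvBase label))
        (PySem.Dict.empty : PySem.Dict String String)).values.foldl
        (fun d base => d.insert base (d.getD base 0 + 1)) PySem.Dict.empty).getD b 0
      = (((all.map pvBase).count b : Nat) : Int) := by
    intro b
    rw [hvals, PySem.Dict.getD_foldl_insert_add_one]
    rw [show (PySem.Dict.empty : PySem.Dict String Int).getD b 0 = 0 from rfl]
    ring
  exact (pv_loopA all hpre _ hg _ hc all [] rfl PySem.Dict.empty PySem.Dict.empty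
      (fun l _ => PySem.Dict.contains_empty l) (fun b _ => by
        rw [show (PySem.Dict.empty : PySem.Dict String Int).getD b 0 = 0 from rfl]
        simp)).trans (by
    rw [show (PySem.Dict.empty : PySem.Dict String String).items = [] from rfl, List.nil_append])
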